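-- pv_equiv track=rewrite | github.com/davidrogger/trybe-webdev-fullstack-course | 04-ciencia-da-computacao/m04-section-05-data-structure-i/m04s05d02-arrays/m04s05d02-follow-material/turistic_tour.py | turist_tour
-- ===== SOURCE A (Python) =====
-- def turist_tour(tour_avaliations):
--     answer = -1
--     previous = -1
--
--     for next_index in range(1, len(tour_avaliations)):
--         current_index = next_index - 1
--
--         previous = max(
--             previous, tour_avaliations[current_index] + current_index
--         )
--         answer = max(
--             answer, previous + tour_avaliations[next_index] - next_index
--         )
--     return answer
-- ===== SOURCE B (Python) =====
-- def turist_tour(tour_avaliations):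
--     # Two-pass: first tabulate, for each position j, the best (value + position)
--     # over all positions before j (starting from the -1 baseline); then take the
--     # best pairing of that table with (value - position) in a single sweep.
--     best_lefts = [-1]
--     for j in range(1, len(tour_avaliations)):
--         best_lefts.append(max(best_lefts[-1], tour_avaliations[j - 1] + j - 1))
--     return max([-1] + [best_lefts[j] + tour_avaliations[j] - j
--                        for j in range(1, len(tour_avaliations))])
-- ===== Notes on version B (the rewrite author's own statement) =====
-- stated objective: alternative
-- what changed: Splits the fused single pass with two running scalar accumulators into two passes: first materialize a prefix-best table best_lefts, then take one max over a comprehension of table-plus-right scores.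
import Mathlib
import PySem

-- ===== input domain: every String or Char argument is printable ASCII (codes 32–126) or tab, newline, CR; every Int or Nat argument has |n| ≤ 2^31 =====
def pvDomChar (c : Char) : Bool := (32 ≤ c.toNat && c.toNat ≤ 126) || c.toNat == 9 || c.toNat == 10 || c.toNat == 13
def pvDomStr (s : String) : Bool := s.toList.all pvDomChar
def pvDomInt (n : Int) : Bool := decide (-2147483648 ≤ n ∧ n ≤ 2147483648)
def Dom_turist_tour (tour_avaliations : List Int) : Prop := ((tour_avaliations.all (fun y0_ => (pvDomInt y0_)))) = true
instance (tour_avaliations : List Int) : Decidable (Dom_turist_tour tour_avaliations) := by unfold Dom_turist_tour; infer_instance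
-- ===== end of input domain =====

-- B restructures the fused single pass into two passes: a materialized prefix-best
-- table followed by one max sweep (objective: alternative; same O(n) cost).

-- ===== PORT A =====
def turist_tour (tour_avaliations : List Int) : Int :=
  ((PySem.List.pyRange 1 (tour_avaliations.length : Int) 1).foldl
    (fun (st : Int × Int) next_index =>
      let current_index := next_index - 1
      let previous := max st.2
        (PySem.List.pyGetD tour_avaliations current_index 0 + current_index)
      (max st.1
        (previous + PySem.List.pyGetD tour_avaliations next_index 0 - next_index),
       previous))
    ((-1 : Int), (-1 : Int))).1

-- ===== PORT B =====
-- max([-1] + comp) over the nonempty literal list is the running-max fold from -1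
-- (PySem: "max(xs) with no key IS the running-max loop", max?_id_cons).
def turist_tour_alt (tour_avaliations : List Int) : Int :=
  let best_lefts :=
    (PySem.List.pyRange 1 (tour_avaliations.length : Int) 1).foldl
      (fun bl j =>
        bl ++ [max (PySem.List.pyGetD bl (-1) 0)
                   (PySem.List.pyGetD tour_avaliations (j - 1) 0 + j - 1)])
      [(-1 : Int)]
  ((PySem.List.pyRange 1 (tour_avaliations.length : Int) 1).map
      (fun j => PySem.List.pyGetD best_lefts j 0
                + PySem.List.pyGetD tour_avaliations j 0 - j)).foldl
    max (-1)

-- ===== PRECONDITION & SPEC =====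
def Spec_turist_tour (tour_avaliations : List Int) (out : Int) : Prop := out = turist_tour_alt tour_avaliations
instance (tour_avaliations : List Int) (out : Int) : Decidable (Spec_turist_tour tour_avaliations out) := by unfold Spec_turist_tour; infer_instance

-- ===== CLAIM (what is proved, stated in full; the proofs are below) =====
def Claim_equal_turist_tour : Prop := ∀ (tour_avaliations : List Int), Dom_turist_tour tour_avaliations → Spec_turist_tour tour_avaliations (turist_tour tour_avaliations)

-- ===== LEMMAS AND PROOFS =====

-- Reference prefix maximum: pvP xs j = best of (xs[i] + i : i < j), floored at -1.
def pvP (xs : List Int) : Nat → Int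
  | 0 => -1
  | n + 1 => max (pvP xs n) (PySem.List.pyGetD xs (n : Int) 0 + (n : Int))

-- Reference answer after processing range(1, n).
def pvA (xs : List Int) : Nat → Int
  | 0 => -1
  | 1 => -1
  | n + 2 => max (pvA xs (n + 1))
      (pvP xs (n + 1) + PySem.List.pyGetD xs ((n + 1 : Nat) : Int) 0 - ((n + 1 : Nat) : Int))

-- A's fold state after range(1, n) is (pvA n, pvP (n-1)).
theorem pvA_fold (xs : List Int) : ∀ n : Nat,
    ((PySem.List.pyRange 1 (n : Int) 1).foldl
      (fun (st : Int × Int) next_index =>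
        let current_index := next_index - 1
        let previous := max st.2
          (PySem.List.pyGetD xs current_index 0 + current_index)
        (max st.1
          (previous + PySem.List.pyGetD xs next_index 0 - next_index),
         previous))
      ((-1 : Int), (-1 : Int)))
    = (pvA xs n, pvP xs (n - 1)) := by
  intro n
  induction n with
  | zero =>
    rw [Nat.cast_zero, PySem.List.pyRange_one_eq_nil (by omega : (0 : Int) ≤ 1)]
    rfl
  | succ n ih =>
    by_cases hn : n = 0
    · subst hn
      rw [Nat.cast_one, PySem.List.pyRange_one_eq_nil (by omega : (1 : Int) ≤ 1)]
      rfl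
    · obtain ⟨m, rfl⟩ : ∃ m, n = m + 1 := ⟨n - 1, by omega⟩
      have hcast : ((m + 1 + 1 : Nat) : Int) = ((m + 1 : Nat) : Int) + 1 := by push_cast; ring
      rw [hcast, PySem.List.pyRange_one_succ_right (by exact_mod_cast Nat.one_le_iff_ne_zero.mpr hn),
        List.foldl_append, ih]
      simp only [List.foldl_cons, List.foldl_nil]
      have h1 : ((m + 1 : Nat) : Int) - 1 = ((m : Nat) : Int) := by push_cast; ring
      have h2 : m + 1 - 1 = m := by omega
      rw [h1, h2]
      show (max (pvA xs (m + 1)) (max (pvP xs m) (PySem.List.pyGetD xs (m : Int) 0 + (m : Int))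
              + PySem.List.pyGetD xs ((m + 1 : Nat) : Int) 0 - ((m + 1 : Nat) : Int)),
            max (pvP xs m) (PySem.List.pyGetD xs (m : Int) 0 + (m : Int)))
          = (pvA xs (m + 2), pvP xs (m + 2 - 1))
    -- fold the recursive definitions back up
      rw [show m + 2 - 1 = m + 1 by omega]
      rw [show pvP xs (m + 1) = max (pvP xs m) (PySem.List.pyGetD xs (m : Int) 0 + (m : Int)) from rfl]
      rfl

-- B's first loop builds exactly the table of prefix maxima.
theorem pvBL_fold (xs : List Int) : ∀ n : Nat,
    ((PySem.List.pyRange 1 (n : Int) 1).foldl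
      (fun bl j =>
        bl ++ [max (PySem.List.pyGetD bl (-1) 0)
                   (PySem.List.pyGetD xs (j - 1) 0 + j - 1)])
      [(-1 : Int)])
    = (List.range (max n 1)).map (pvP xs) := by
  intro n
  induction n with
  | zero =>
    rw [Nat.cast_zero, PySem.List.pyRange_one_eq_nil (by omega : (0 : Int) ≤ 1)]
    rfl
  | succ n ih =>
    by_cases hn : n = 0
    · subst hn
      rw [Nat.cast_one, PySem.List.pyRange_one_eq_nil (by omega : (1 : Int) ≤ 1)]
      rfl
    · have h1n : 1 ≤ n := Nat.one_le_iff_ne_zero.mpr hn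
      have hcast : ((n + 1 : Nat) : Int) = ((n : Nat) : Int) + 1 := by push_cast; ring
      rw [hcast, PySem.List.pyRange_one_succ_right (by exact_mod_cast h1n),
        List.foldl_append, ih]
      simp only [List.foldl_cons, List.foldl_nil]
      have hmax : max n 1 = n := by omega
      rw [hmax]
      obtain ⟨m, rfl⟩ : ∃ m, n = m + 1 := ⟨n - 1, by omega⟩
      have hbl : (List.range (m + 1)).map (pvP xs)
          = (List.range m).map (pvP xs) ++ [pvP xs m] := by
        rw [List.range_succ, List.map_append, List.map_singleton]
      rw [hbl, PySem.List.pyGetD_neg_one_append_singleton]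
      have h2 : ((m + 1 : Nat) : Int) - 1 = ((m : Nat) : Int) := by push_cast; ring
      rw [h2]
      have h4 : PySem.List.pyGetD xs ((m : Nat) : Int) 0 + ((m + 1 : Nat) : Int) - 1
          = PySem.List.pyGetD xs ((m : Nat) : Int) 0 + ((m : Nat) : Int) := by
        push_cast; ring
      rw [h4]
      rw [show max (m + 1 + 1) 1 = m + 1 + 1 from by omega]
      rw [List.range_succ (n := m + 1), List.map_append, List.map_singleton, hbl]
      rfl

-- B's final sweep over the reference table computes pvA n.
theorem pvB_fold (xs : List Int) : ∀ n : Nat,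
    (((PySem.List.pyRange 1 (n : Int) 1).map
        (fun j => pvP xs j.toNat + PySem.List.pyGetD xs j 0 - j)).foldl max (-1))
    = pvA xs n := by
  intro n
  induction n with
  | zero =>
    rw [Nat.cast_zero, PySem.List.pyRange_one_eq_nil (by omega : (0 : Int) ≤ 1)]
    rfl
  | succ n ih =>
    by_cases hn : n = 0
    · subst hn
      rw [Nat.cast_one, PySem.List.pyRange_one_eq_nil (by omega : (1 : Int) ≤ 1)]
      rfl
    · obtain ⟨m, rfl⟩ : ∃ m, n = m + 1 := ⟨n - 1, by omega⟩
      have hcast : ((m + 1 + 1 : Nat) : Int) = ((m + 1 : Nat) : Int) + 1 := by push_cast; ring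
      rw [hcast, PySem.List.pyRange_one_succ_right (by exact_mod_cast Nat.one_le_iff_ne_zero.mpr hn),
        List.map_append, List.foldl_append, ih]
      simp only [List.map_cons, List.map_nil, List.foldl_cons, List.foldl_nil]
      rw [show ((m + 1 : Nat) : Int).toNat = m + 1 from by omega]
      rfl

-- ===== VERDICT (by name: the statement is the Claim_ definition above) =====
theorem turist_tour_spec : Claim_equal_turist_tour := by
  intro xs _
  unfold Spec_turist_tour turist_tour turist_tour_alt
  simp only [pvA_fold xs xs.length, pvBL_fold xs xs.length]
  have hmap : (PySem.List.pyRange 1 (xs.length : Int) 1).map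
        (fun j => PySem.List.pyGetD ((List.range (max xs.length 1)).map (pvP xs)) j 0
                  + PySem.List.pyGetD xs j 0 - j)
      = (PySem.List.pyRange 1 (xs.length : Int) 1).map
        (fun j => pvP xs j.toNat + PySem.List.pyGetD xs j 0 - j) := by
    apply List.map_congr_left
    intro j hj
    have hmem := (PySem.List.mem_pyRange_one).mp hj
    have hjlt : j < (xs.length : Int) := hmem.2
    have hlen : ((List.range (max xs.length 1)).map (pvP xs)).length = max xs.length 1 := by
      simp
    have hje : PySem.List.pyGetD ((List.range (max xs.length 1)).map (pvP xs)) j 0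
        = pvP xs j.toNat := by
      rw [PySem.List.pyGetD_eq_getElem _ _ (by omega)
        (by simp only [List.length_map, List.length_range]; push_cast; omega)]
      rw [List.getElem_map, List.getElem_range]
    rw [hje]
  rw [hmap]
  exact (pvB_fold xs xs.length).symm
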